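-- pv_equiv track=rewrite | github.com/BabaChiku/DSA_Journey | Scaler/Module 2 - Introduction to problem solving/Class 3 - Introduction to Arrays/AP2-TimeToEquality.py | solve
-- ===== SOURCE A (Python) =====
-- def solve(A):
--     # Find length of the array A
--     n = len(A)
--     # Initialize the minTime, max_value, i, j and elements variables
--     minTime = 0
--     max_value = A[0]
--     i = 0
--     j = n - 1
--     elements = 0
--
--     # Loop through the array A to find minimum time to make all elements equal
--     while i < j:
--         # Check if A[i] is greater or A[j] is greater
--         if A[i] > A[j]:
--             # If A[i] is greater, check if it is greater than max_value
--             if A[i] > max_value: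
--                 minTime += (A[i] - A[j]) + (elements * (A[i] - max_value))
--                 max_value = A[i]
--             else:
--                 minTime += (max_value - A[j]) + (max_value - A[i])
--         else:
--             # If A[j] is greater, check if it is greater than max_value
--             if A[j] > max_value:
--                 minTime += (A[j] - A[i]) + (elements * (A[j] - max_value))
--                 max_value = A[j]
--             else:
--                 minTime += (max_value - A[i]) + (max_value - A[j])
--
--         # Move the pointers towards each other
--         i += 1
--         j -= 1
--         # Increment the elements variable
--         elements += 2
--     # If i is equal to j
--     if i == j:
--         # Check if A[i] is greater than max_value
--         if A[i] > max_value: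
--             minTime += (elements * (A[i] - max_value))
--             max_value = A[i]
--         else:
--             minTime += (max_value - A[i])
--     # Return the minimum time to make all elements equal
--     return minTime
-- ===== SOURCE B (Python) =====
-- def solve(A):
--     m = A[0]
--     for x in A:
--         if x > m:
--             m = x
--     return len(A) * m - sum(A)
-- ===== Notes on version B (the rewrite author's own statement) =====
-- stated objective: simpler
-- what changed: Replaces the two-pointer loop that accumulates pairwise differences and rescales on each new maximum by a single max-scan and the closed-form total n*max - sum.
import Mathlib
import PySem

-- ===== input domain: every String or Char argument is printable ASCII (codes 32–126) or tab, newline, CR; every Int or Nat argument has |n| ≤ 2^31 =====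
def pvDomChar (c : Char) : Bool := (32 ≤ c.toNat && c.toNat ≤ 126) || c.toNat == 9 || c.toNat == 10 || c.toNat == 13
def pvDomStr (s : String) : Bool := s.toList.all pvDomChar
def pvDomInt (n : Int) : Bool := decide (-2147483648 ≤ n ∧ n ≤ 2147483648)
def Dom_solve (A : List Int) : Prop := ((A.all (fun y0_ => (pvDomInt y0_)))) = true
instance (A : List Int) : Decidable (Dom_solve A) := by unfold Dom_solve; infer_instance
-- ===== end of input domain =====

-- B replaces A's two-pointer difference accumulation by the closed form n*max - sum (objective: simpler).
-- ===== PORT A =====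
def solveLoop (A : List Int) (i j minTime max_value elements : Int) : Int :=
  if _h : i < j then
    if PySem.List.pyGetD A i 0 > PySem.List.pyGetD A j 0 then
      if PySem.List.pyGetD A i 0 > max_value then
        solveLoop A (i + 1) (j - 1)
          (minTime + (PySem.List.pyGetD A i 0 - PySem.List.pyGetD A j 0)
            + elements * (PySem.List.pyGetD A i 0 - max_value))
          (PySem.List.pyGetD A i 0) (elements + 2)
      else
        solveLoop A (i + 1) (j - 1)
          (minTime + (max_value - PySem.List.pyGetD A j 0) + (max_value - PySem.List.pyGetD A i 0))
          max_value (elements + 2)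
    else
      if PySem.List.pyGetD A j 0 > max_value then
        solveLoop A (i + 1) (j - 1)
          (minTime + (PySem.List.pyGetD A j 0 - PySem.List.pyGetD A i 0)
            + (elements * (PySem.List.pyGetD A j 0 - max_value)))
          (PySem.List.pyGetD A j 0) (elements + 2)
      else
        solveLoop A (i + 1) (j - 1)
          (minTime + (max_value - PySem.List.pyGetD A i 0) + (max_value - PySem.List.pyGetD A j 0))
          max_value (elements + 2)
  else if i = j then
    if PySem.List.pyGetD A i 0 > max_value then minTime + elements * (PySem.List.pyGetD A i 0 - max_value)
    else minTime + (max_value - PySem.List.pyGetD A i 0)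
  else minTime
termination_by (j - i).toNat
decreasing_by all_goals omega

def solve (A : List Int) : Int :=
  solveLoop A 0 ((A.length : Int) - 1) 0 (PySem.List.pyGetD A 0 0) 0

-- ===== PORT B =====
def solve_alt (A : List Int) : Int :=
  let m := A.foldl (fun m x => if x > m then x else m) (PySem.List.pyGetD A 0 0)
  (A.length : Int) * m - A.sum

-- ===== PRECONDITION & SPEC =====
-- Pre_ excludes the empty list, on which Python A raises IndexError at its first-element read (and so does B).
def Pre_solve (A : List Int) : Prop := A ≠ []
instance (A : List Int) : Decidable (Pre_solve A) := by unfold Pre_solve; infer_instance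
def pvWitness_solve : List Int := ([3, 1, 2] : List Int)
def Spec_solve (A : List Int) (out : Int) : Prop := out = solve_alt A
instance (A : List Int) (out : Int) : Decidable (Spec_solve A out) := by unfold Spec_solve; infer_instance

-- ===== CLAIM (what is proved, stated in full; the proofs are below) =====
def Claim_equal_solve : Prop := ∀ (A : List Int), Dom_solve A → Pre_solve A → Spec_solve A (solve A)

-- ===== LEMMAS AND PROOFS =====

lemma foldl_max_swap (l : List Int) (a b : Int) :
    l.foldl max (max a b) = max (l.foldl max a) b := by
  induction l generalizing a b with
  | nil => simp
  | cons x xs ih =>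
      simp only [List.foldl_cons]
      rw [show max (max a b) x = max (max a x) b by omega, ih]

/-- A's loop on the index window `[i, j]` computes `el*(M - mv) + (len*M - sum)` over the
    window's slice `L`, where `M = L.foldl max mv`. -/
lemma solveLoop_eq (L : List Int) : ∀ (A : List Int) (i j mt mv el : Int),
    0 ≤ i → j < (A.length : Int) → (L.length : Int) = j - i + 1 →
    L = (A.drop i.toNat).take L.length →
    solveLoop A i j mt mv el
      = mt + el * (L.foldl max mv - mv) + ((L.length : Int) * L.foldl max mv - L.sum) := by
  induction L using List.bidirectionalRec with
  | nil =>
      intro A i j mt mv el h0 hj hlen hL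
      simp only [List.length_nil, Nat.cast_zero] at hlen
      unfold solveLoop
      rw [dif_neg (show ¬ i < j by omega), if_neg (show ¬ i = j by omega)]
      simp
  | singleton x =>
      intro A i j mt mv el h0 hj hlen hL
      simp only [List.length_singleton, Nat.cast_one] at hlen
      have hij : i = j := by omega
      have hin : i.toNat < A.length := by omega
      have hx : PySem.List.pyGetD A i 0 = x := by
        rw [PySem.List.pyGetD_eq_getElem A 0 h0 (by omega)]
        have e := List.getElem_of_eq hL (show 0 < [x].length by simp)
        simp only [List.getElem_singleton, List.getElem_take, List.getElem_drop,
          Nat.add_zero] at e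
        simpa using e.symm
      unfold solveLoop
      rw [dif_neg (show ¬ i < j by omega), if_pos hij, hx]
      simp only [List.foldl_cons, List.foldl_nil, List.length_singleton, Nat.cast_one,
        List.sum_cons, List.sum_nil]
      split_ifs with h
      · rw [show max mv x = x by omega]; ring
      · rw [show max mv x = mv by omega]; ring
  | cons_append x mid y ih =>
      intro A i j mt mv el h0 hj hlen hL
      have hlen2 : (x :: (mid ++ [y])).length = mid.length + 2 := by simp
      rw [hlen2] at hlen hL
      push_cast at hlen
      have hij : i < j := by omega
      have hin : i.toNat < A.length := by omega
      have hjn : j.toNat < A.length := by omega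
      have hx : PySem.List.pyGetD A i 0 = x := by
        rw [PySem.List.pyGetD_eq_getElem A 0 h0 (by omega)]
        have e := List.getElem_of_eq hL (show 0 < (x :: (mid ++ [y])).length by simp)
        simp only [List.getElem_cons_zero, List.getElem_take, List.getElem_drop,
          Nat.add_zero] at e
        exact e.symm
      have hy : PySem.List.pyGetD A j 0 = y := by
        rw [PySem.List.pyGetD_eq_getElem A 0 (by omega) (by omega)]
        have hm : mid.length + 1 < (x :: (mid ++ [y])).length := by simp
        have e := List.getElem_of_eq hL hm
        have e1 : (x :: (mid ++ [y]))[mid.length + 1]'hm = y := by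
          simp [List.getElem_cons_succ, List.getElem_append_right]
        simp only [List.getElem_take, List.getElem_drop] at e
        rw [e1] at e
        have e2 : A[j.toNat]'hjn = A[i.toNat + (mid.length + 1)]'(by omega) := by
          congr 1
          omega
        exact e2.trans e.symm
      have hmid : mid = (A.drop (i + 1).toNat).take mid.length := by
        apply List.ext_getElem
        · simp; omega
        · intro m hm1 hm2
          have hm : m + 1 < (x :: (mid ++ [y])).length := by simp; omega
          have e := List.getElem_of_eq hL hm
          have e1 : (x :: (mid ++ [y]))[m + 1]'hm = mid[m]'hm1 := by
            simp [List.getElem_cons_succ, hm1]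
          simp only [List.getElem_take, List.getElem_drop] at e
          rw [e1] at e
          simp only [List.getElem_take, List.getElem_drop]
          rw [e]
          congr 1
          omega
      have hmlen : ((mid.length : Int)) = (j - 1) - (i + 1) + 1 := by omega
      have hfold : ∀ s : Int, (x :: (mid ++ [y])).foldl max s = mid.foldl max (max (max s x) y) := by
        intro s
        simp only [List.foldl_cons, List.foldl_append, List.foldl_nil]
        rw [← foldl_max_swap]
      unfold solveLoop
      rw [dif_pos hij, hx, hy]
      split_ifs with h1 h2 h3 <;>
        rw [ih A (i + 1) (j - 1) _ _ _ (by omega) (by omega) hmlen hmid, hfold mv] <;>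
        [rw [show max (max mv x) y = x by omega];
         rw [show max (max mv x) y = mv by omega];
         rw [show max (max mv x) y = y by omega];
         rw [show max (max mv x) y = mv by omega]] <;>
        · simp only [List.length_cons, List.length_append, List.length_nil,
            List.sum_cons, List.sum_append, List.sum_nil]
          push_cast
          ring

lemma foldl_if_eq_max (A : List Int) (s : Int) :
    A.foldl (fun m x => if x > m then x else m) s = A.foldl max s := by
  induction A generalizing s with
  | nil => rfl
  | cons x xs ih =>
      simp only [List.foldl_cons, ih]
      congr 1
      split_ifs <;> omega

-- ===== VERDICT (by name: the statement is the Claim_ definition above) =====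
theorem solve_spec : Claim_equal_solve := by
  intro A _hdom hpre
  unfold Spec_solve solve solve_alt
  have hne : A.length ≠ 0 := by simpa using fun h => hpre (List.eq_nil_of_length_eq_zero h)
  rw [solveLoop_eq A A 0 ((A.length : Int) - 1) 0 (PySem.List.pyGetD A 0 0) 0
      (by omega) (by omega) (by omega) (by simp)]
  rw [foldl_if_eq_max]
  ring
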